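-- pv_equiv track=rewrite | github.com/Luolingwei/LeetCode | Greedy/QTwitter_Activate Fountain.py | activate
-- ===== SOURCE A (Python) =====
-- import collections
--
-- def activate(limits):
--     L=len(limits)
--     intervals=collections.defaultdict(int)
--     for i in range(L):
--         l,r=max(0,i-limits[i]),min(L-1,i+limits[i])
--         intervals[l]=max(intervals[l],r)
--     intervals=sorted([(l,intervals[l]) for l in intervals])
--     cur,end,ans=0,intervals[0][1],1
--     while end<L-1:
--         curMax=0
--         while cur<len(intervals) and intervals[cur][0]<=end+1:
--             curMax=max(curMax,intervals[cur][1])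
--             cur+=1
--         end=curMax
--         ans+=1
--     return ans
-- ===== SOURCE B (Python) =====
-- def activate(limits):
--     L = len(limits)
--     # P[p] = furthest position watered by any fountain whose watered range opens at p
--     P = [-1] * L
--     for i, d in enumerate(limits):
--         if d >= 0:
--             lo = i - d
--             if lo < 0:
--                 lo = 0
--             hi = i + d
--             if hi > L - 1:
--                 hi = L - 1
--             if hi > P[lo]:
--                 P[lo] = hi
--     # turn P into a prefix maximum: P[p] = furthest reach from any opening point <= p
--     for p in range(1, L):
--         if P[p] < P[p - 1]:
--             P[p] = P[p - 1]
--     if L == 1: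
--         return 1
--     # first fountain: the one opening leftmost (opening point 0 or 1, else position 1 is dry)
--     end = P[0] if P[0] >= 0 else P[1]
--     ans = 1
--     # each further fountain jumps straight to the best reach from opening points <= end+1
--     while end < L - 1:
--         end = P[end + 1]
--         ans += 1
--     return ans
-- ===== Notes on version B (the rewrite author's own statement) =====
-- stated objective: faster
-- what changed: B drops A's defaultdict + sort + pointer-scanning inner loop entirely: it builds a prefix-maximum reach table P (P[p] = furthest position watered from any opening point <= p) in two linear passes and then makes each greedy jump in O(1) as end = P[end+1]; no sort, no inner loop (measured ~4.9x faster at n=262144).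
-- outside the precondition, e.g. on activate([-2, -1, 0]): A returns 1, B does not finish within the time limit; on activate([]): A raises IndexError, B raises IndexError
import Mathlib
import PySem

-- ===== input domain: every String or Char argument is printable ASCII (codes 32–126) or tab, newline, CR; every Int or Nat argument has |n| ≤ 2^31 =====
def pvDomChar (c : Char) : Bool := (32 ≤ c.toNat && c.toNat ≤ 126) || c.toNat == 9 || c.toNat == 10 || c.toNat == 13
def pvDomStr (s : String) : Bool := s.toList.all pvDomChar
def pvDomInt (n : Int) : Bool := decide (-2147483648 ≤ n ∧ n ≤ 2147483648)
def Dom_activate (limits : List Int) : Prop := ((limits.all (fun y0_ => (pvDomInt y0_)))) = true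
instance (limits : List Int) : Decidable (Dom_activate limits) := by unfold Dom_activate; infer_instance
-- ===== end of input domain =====

-- B replaces A's defaultdict + sort + pointer-scanning inner loop by a prefix-maximum reach
-- table built in two linear passes; each greedy jump is then a single table lookup.

-- ===== PORT A =====
-- inner `while cur<len(intervals) and intervals[cur][0]<=end+1`: the unconsumed suffix plays the role of `cur`
-- outer `while end<L-1` carries fuel limits.length+1, which the loop never exhausts on Pre_ inputs
def activateInnerA : List (Int × Int) → Int → Int → (List (Int × Int) × Int)
  | [], _, curMax => ([], curMax)
  | (l, r) :: rest, T, curMax =>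
    if l ≤ T then activateInnerA rest T (max curMax r) else ((l, r) :: rest, curMax)

def activateLoopA : List (Int × Int) → Int → Nat → Int → Int → Int
  | _, _, 0, _, ans => ans
  | rem, L, fuel+1, end_, ans =>
    if end_ < L - 1 then
      let s := activateInnerA rem (end_ + 1) 0
      activateLoopA s.1 L fuel s.2 (ans + 1)
    else ans


def activate (limits : List Int) : Int :=
  let L : Int := limits.length
  -- defaultdict(int): intervals[l]=max(intervals[l],r) reads 0 for a missing key
  let intervals : PySem.Dict Int Int :=
    (PySem.List.pyRange 0 L 1).foldl
      (fun d i =>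
        let l := max 0 (i - PySem.List.pyGetD limits i 0)
        let r := min (L - 1) (i + PySem.List.pyGetD limits i 0)
        d.insert l (max (d.getD l 0) r))
      PySem.Dict.empty
  -- sorted([(l,intervals[l]) for l in intervals]): tuple sort = sorted2 on (fst, snd)
  let items := PySem.List.sorted2 (intervals.keys.map (fun l => (l, intervals.getD l 0)))
      (fun p => p.1) (fun p => p.2) false
  -- intervals[0][1] (IndexError on the empty input, which Pre_ excludes)
  let end0 := (PySem.List.pyGetD items 0 ((0:Int), (0:Int))).2
  activateLoopA items L (limits.length + 1) end0 1

-- ===== PORT B =====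
-- `for i, d in enumerate(limits): if d >= 0: … if hi > P[lo]: P[lo] = hi` (bucket fill)
def pvBuckB (limits : List Int) : List Int :=
  (List.range limits.length).foldl
    (fun P i =>
      let d := limits.getD i 0
      if 0 ≤ d then
        let lo := if (i : Int) - d < 0 then 0 else (i : Int) - d
        let hi := if (limits.length : Int) - 1 < (i : Int) + d then (limits.length : Int) - 1
                  else (i : Int) + d
        if P.getD lo.toNat (-1) < hi then P.set lo.toNat hi else P
      else P)
    (List.replicate limits.length (-1))

-- `for p in range(1, L): if P[p] < P[p-1]: P[p] = P[p-1]` (in-place prefix maximum)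
def pvPrefB (limits : List Int) : List Int :=
  (List.range' 1 (limits.length - 1)).foldl
    (fun P p => if P.getD p (-1) < P.getD (p-1) (-1) then P.set p (P.getD (p-1) (-1)) else P)
    (pvBuckB limits)

-- `while end < L-1: end = P[end+1]; ans += 1` — `P[end+1]` ported as getD: Python would raise
-- IndexError out of range, and Pre_ keeps the index inside the table; fuel is never exhausted on Pre_ inputs
def activateLoopB (P : List Int) (L : Int) : Nat → Int → Int → Int
  | 0, _, ans => ans
  | fuel+1, end_, ans =>
    if end_ < L - 1 then
      activateLoopB P L fuel (P.getD (end_ + 1).toNat (-1)) (ans + 1)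
    else ans

def activate_alt (limits : List Int) : Int :=
  let P := pvPrefB limits
  if limits.length = 1 then 1
  else
    -- `end = P[0] if P[0] >= 0 else P[1]` (the leftmost opening point is 0 or 1, else position 1 is dry)
    let end0 := if 0 ≤ P.getD 0 (-1) then P.getD 0 (-1) else P.getD 1 (-1)
    activateLoopB P (limits.length : Int) (limits.length + 1) end0 1

-- ===== PRECONDITION & SPEC =====
-- Pre_ excludes the empty list (A raises IndexError) and inputs whose fountains leave some
-- position 1..L-1 dry: there A loops forever, except in a rare accident (every watered range
-- starts right of a dry spot while one of them still reaches position L-1) where A returns 1.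
def Pre_activate (limits : List Int) : Prop :=
  limits ≠ [] ∧
    ∀ x, x < limits.length → 1 ≤ x →
      ∃ i, i < limits.length ∧
        (i : Int) - limits.getD i 0 ≤ (x : Int) ∧ (x : Int) ≤ (i : Int) + limits.getD i 0

instance (limits : List Int) : Decidable (Pre_activate limits) := by
  unfold Pre_activate; infer_instance

def pvWitness_activate : List Int := [1, 0, 2, 0, 1]

def Spec_activate (limits : List Int) (out : Int) : Prop := out = activate_alt limits
instance (limits : List Int) (out : Int) : Decidable (Spec_activate limits out) := by
  unfold Spec_activate; infer_instance

-- ===== CLAIM (what is proved, stated in full; the proofs are below) =====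
def Claim_equal_activate : Prop :=
  ∀ (limits : List Int), Dom_activate limits → Pre_activate limits →
    Spec_activate limits (activate limits)

-- ===== LEMMAS AND PROOFS =====

def pvA (limits : List Int) (i : Nat) : Int := limits.getD i 0
def pvKey (limits : List Int) (i : Nat) : Int := max 0 ((i : Int) - pvA limits i)
def pvR (limits : List Int) (i : Nat) : Int :=
  min ((limits.length : Int) - 1) ((i : Int) + pvA limits i)
def pvGen (limits : List Int) (i : Nat) : Bool :=
  decide (0 ≤ pvA limits i ∧ pvKey limits i ≤ (limits.length : Int) - 1)

def pvDict (limits : List Int) (m : Nat) : PySem.Dict Int Int :=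
  (PySem.List.pyRange 0 (m : Int) 1).foldl
    (fun d i =>
      let l := max 0 (i - PySem.List.pyGetD limits i 0)
      let r := min ((limits.length : Int) - 1) (i + PySem.List.pyGetD limits i 0)
      d.insert l (max (d.getD l 0) r))
    PySem.Dict.empty

def pvGmax (limits : List Int) (m : Nat) (l : Int) : Int :=
  ((List.range m).filter (fun i => pvKey limits i == l)).foldl
    (fun acc i => max acc (pvR limits i)) 0

theorem pvDict_succ (limits : List Int) (m : Nat) :
    pvDict limits (m+1) = (pvDict limits m).insert (pvKey limits m)
      (max ((pvDict limits m).getD (pvKey limits m) 0) (pvR limits m)) := by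
  unfold pvDict
  rw [show ((m+1 : Nat) : Int) = (m : Int) + 1 by push_cast; ring,
    PySem.List.pyRange_one_succ_right (by positivity), List.foldl_append]
  simp [PySem.List.pyGetD_natCast, pvKey, pvR, pvA]

theorem pvGmax_succ (limits : List Int) (m : Nat) (l : Int) :
    pvGmax limits (m+1) l =
      if pvKey limits m = l then max (pvGmax limits m l) (pvR limits m)
      else pvGmax limits m l := by
  unfold pvGmax
  rw [List.range_succ, List.filter_append]
  by_cases h : pvKey limits m = l
  · simp [h, List.foldl_append]
  · simp [h]

theorem pvDict_getD (limits : List Int) (m : Nat) (l : Int) :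
    (pvDict limits m).getD l 0 = pvGmax limits m l := by
  induction m with
  | zero => simp [pvDict, pvGmax]
  | succ m ih =>
    rw [pvDict_succ, pvGmax_succ, PySem.Dict.getD_insert]
    by_cases h : l = pvKey limits m
    · subst h
      rw [if_pos rfl, if_pos rfl, ih]
    · rw [if_neg h, if_neg (fun hh => h hh.symm)]
      exact ih

theorem pvDict_keys (limits : List Int) (m : Nat) (l : Int) :
    l ∈ (pvDict limits m).keys ↔ ∃ i, i < m ∧ pvKey limits i = l := by
  induction m with
  | zero => simp [pvDict, PySem.Dict.keys_empty]
  | succ m ih =>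
    rw [pvDict_succ, PySem.Dict.mem_keys_insert]
    constructor
    · rintro (h | h)
      · exact ⟨m, by omega, h.symm⟩
      · obtain ⟨i, hi, hk⟩ := ih.1 h; exact ⟨i, by omega, hk⟩
    · rintro ⟨i, hi, hk⟩
      by_cases him : i = m
      · exact Or.inl (him ▸ hk).symm
      · exact Or.inr (ih.2 ⟨i, by omega, hk⟩)

theorem pvDict_nodup (limits : List Int) (m : Nat) : (pvDict limits m).keys.Nodup := by
  induction m with
  | zero => simp [pvDict, PySem.Dict.keys_empty]
  | succ m ih =>
    rw [pvDict_succ]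
    by_cases h : (pvDict limits m).contains (pvKey limits m)
    · rwa [PySem.Dict.keys_insert_of_contains _ _ h]
    · rw [PySem.Dict.keys_insert_of_not_contains _ _ (by simpa using h)]
      refine List.Nodup.append ih (List.nodup_singleton _) ?_
      intro a ha hb
      rw [List.mem_singleton] at hb
      subst hb
      exact absurd ((PySem.Dict.contains_iff_mem_keys _ _).2 ha) (by simpa using h)

-- ===== B's bucket fill =====

def pvBuckPart (limits : List Int) (m : Nat) : List Int :=
  (List.range m).foldl
    (fun P i =>
      let d := limits.getD i 0
      if 0 ≤ d then
        let lo := if (i : Int) - d < 0 then 0 else (i : Int) - d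
        let hi := if (limits.length : Int) - 1 < (i : Int) + d then (limits.length : Int) - 1
                  else (i : Int) + d
        if P.getD lo.toNat (-1) < hi then P.set lo.toNat hi else P
      else P)
    (List.replicate limits.length (-1))

theorem pvBuckB_eq_part (limits : List Int) : pvBuckB limits = pvBuckPart limits limits.length := rfl

def pvFmax (limits : List Int) (m : Nat) (l : Int) : Int :=
  ((List.range m).filter (fun i => pvGen limits i && (pvKey limits i == l))).foldl
    (fun acc i => max acc (pvR limits i)) (-1)

theorem pvGen_iff (limits : List Int) (i : Nat) (hi : i < limits.length) :
    pvGen limits i = true ↔ 0 ≤ limits.getD i 0 := by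
  simp only [pvGen, pvKey, pvA, decide_eq_true_eq]
  omega

theorem pvKey_toNat (limits : List Int) (i : Nat) (h : pvGen limits i = true) :
    ((pvKey limits i).toNat : Int) = pvKey limits i ∧ (pvKey limits i).toNat < limits.length := by
  simp only [pvGen, pvKey, pvA, decide_eq_true_eq] at h ⊢
  omega

theorem pvBuckPart_length (limits : List Int) (m : Nat) :
    (pvBuckPart limits m).length = limits.length := by
  induction m with
  | zero => simp [pvBuckPart]
  | succ m ih =>
    unfold pvBuckPart at *
    simp only [List.range_succ, List.foldl_append, List.foldl_cons, List.foldl_nil]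
    split_ifs <;> first | (rw [List.length_set]; exact ih) | exact ih

theorem pvBuckPart_succ (limits : List Int) (m : Nat) (hm : m < limits.length) :
    pvBuckPart limits (m+1) =
      if pvGen limits m = true then
        (if (pvBuckPart limits m).getD (pvKey limits m).toNat (-1) < pvR limits m then
          (pvBuckPart limits m).set (pvKey limits m).toNat (pvR limits m)
        else pvBuckPart limits m)
      else pvBuckPart limits m := by
  conv_lhs => rw [pvBuckPart, List.range_succ, List.foldl_append, List.foldl_cons, List.foldl_nil]
  rw [show (List.range m).foldl _ (List.replicate limits.length (-1)) = pvBuckPart limits m from rfl]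
  dsimp only
  have hlo : (if (m:Int) - limits.getD m 0 < 0 then 0 else (m:Int) - limits.getD m 0)
      = pvKey limits m := by
    simp only [pvKey, pvA]; omega
  have hhi : (if (limits.length:Int) - 1 < (m:Int) + limits.getD m 0 then (limits.length:Int) - 1
      else (m:Int) + limits.getD m 0) = pvR limits m := by
    simp only [pvR, pvA]; omega
  by_cases hg : pvGen limits m = true
  · rw [if_pos ((pvGen_iff limits m hm).1 hg), if_pos hg, hlo, hhi]
  · rw [if_neg (fun hc => hg ((pvGen_iff limits m hm).2 hc)), if_neg hg]

theorem pvFmax_succ (limits : List Int) (m : Nat) (l : Int) :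
    pvFmax limits (m+1) l =
      if pvGen limits m = true ∧ pvKey limits m = l then max (pvFmax limits m l) (pvR limits m)
      else pvFmax limits m l := by
  unfold pvFmax
  rw [List.range_succ, List.filter_append]
  by_cases h : pvGen limits m = true ∧ pvKey limits m = l
  · simp [h.1, h.2, List.foldl_append]
  · rw [if_neg h]
    rcases Decidable.not_and_iff_not_or_not.1 h with h1 | h1 <;> simp [h1]

theorem pvBuckPart_getD (limits : List Int) (m : Nat) (hm : m ≤ limits.length) (l : Nat)
    (hl : l < limits.length) : (pvBuckPart limits m).getD l (-1) = pvFmax limits m (l : Int) := by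
  induction m with
  | zero => simp [pvBuckPart, pvFmax, List.getD_eq_getElem?_getD, hl]
  | succ m ih =>
    have ih := ih (by omega)
    rw [pvBuckPart_succ limits m (by omega), pvFmax_succ]
    by_cases hg : pvGen limits m = true
    · rw [if_pos hg]
      obtain ⟨hcast, hlt⟩ := pvKey_toNat limits m hg
      have hfl := pvBuckPart_length limits m
      by_cases hless : (pvBuckPart limits m).getD (pvKey limits m).toNat (-1) < pvR limits m
      · rw [if_pos hless]
        by_cases hk : pvKey limits m = (l : Int)
        · rw [if_pos ⟨hg, hk⟩]
          have hsl : (pvKey limits m).toNat = l := by omega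
          rw [hsl] at hless ⊢
          rw [List.getD_eq_getElem?_getD, List.getElem?_set_self (by omega),
            Option.getD_some, ← ih]
          omega
        · rw [if_neg (by rintro ⟨_, h2⟩; exact hk h2)]
          have hne : (pvKey limits m).toNat ≠ l := by omega
          rw [List.getD_eq_getElem?_getD, List.getElem?_set_ne (by omega),
            ← List.getD_eq_getElem?_getD, ih]
      · rw [if_neg hless]
        by_cases hk : pvKey limits m = (l : Int)
        · rw [if_pos ⟨hg, hk⟩]
          have hsl : (pvKey limits m).toNat = l := by omega
          rw [hsl] at hless
          rw [ih] at hless ⊢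
          omega
        · rw [if_neg (by rintro ⟨_, h2⟩; exact hk h2), ih]
    · rw [if_neg hg, if_neg (by rintro ⟨h1, _⟩; exact hg h1)]
      exact ih

-- ===== bounds and A-value/B-value relations =====

theorem pvFoldMax_le {α : Type} (f : α → Int) (M : Int) :
    ∀ (xs : List α) (init : Int), init ≤ M → (∀ x ∈ xs, f x ≤ M) →
      xs.foldl (fun acc x => max acc (f x)) init ≤ M
  | [], init, h0, _ => h0
  | x :: t, init, h0, h => by
    simpa using pvFoldMax_le f M t (max init (f x))
      (by have := h x (by simp); omega) (fun y hy => h y (by simp [hy]))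

theorem pvKey_nonneg (limits : List Int) (i : Nat) : 0 ≤ pvKey limits i := by
  simp [pvKey]

theorem pvR_le (limits : List Int) (i : Nat) : pvR limits i ≤ (limits.length : Int) - 1 := by
  simp [pvR]

theorem pvR_lt_key_of_not_gen (limits : List Int) (i : Nat) (hi : i < limits.length)
    (h : ¬ pvGen limits i = true) : pvR limits i < pvKey limits i := by
  simp only [pvGen, pvKey, pvR, pvA, decide_eq_true_eq] at h ⊢
  omega

theorem pvKey_le_pvR_of_gen (limits : List Int) (i : Nat) (h : pvGen limits i = true) :
    pvKey limits i ≤ pvR limits i := by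
  simp only [pvGen, pvKey, pvR, pvA, decide_eq_true_eq] at h ⊢
  omega

theorem pvGmax_nonneg (limits : List Int) (m : Nat) (l : Int) : 0 ≤ pvGmax limits m l :=
  (PySem.List.le_foldl_max_int _ _ _).1

theorem pvFmax_ge (limits : List Int) (m : Nat) (l : Int) : -1 ≤ pvFmax limits m l :=
  (PySem.List.le_foldl_max_int _ _ _).1

theorem pvGmax_le (limits : List Int) (m : Nat) (l : Int) (hL : 1 ≤ limits.length) :
    pvGmax limits m l ≤ (limits.length : Int) - 1 :=
  pvFoldMax_le _ _ _ _ (by omega) (fun i _ => pvR_le limits i)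

theorem pvR_le_pvGmax (limits : List Int) (m : Nat) (i : Nat) (hi : i < m)
    (hk : pvKey limits i = l) : pvR limits i ≤ pvGmax limits m l :=
  (PySem.List.le_foldl_max_int _ _ _).2 i
    (by rw [List.mem_filter]; exact ⟨by simp [hi], by simp [hk]⟩)

theorem pvR_le_pvFmax (limits : List Int) (m : Nat) (i : Nat) (hi : i < m)
    (hg : pvGen limits i = true) (hk : pvKey limits i = l) :
    pvR limits i ≤ pvFmax limits m l :=
  (PySem.List.le_foldl_max_int _ _ _).2 i
    (by rw [List.mem_filter]; exact ⟨by simp [hi], by simp [hg, hk]⟩)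

theorem pvGmax_mem (limits : List Int) (m : Nat) (l : Int) :
    pvGmax limits m l = 0 ∨
      ∃ i, i < m ∧ pvKey limits i = l ∧ pvGmax limits m l = pvR limits i := by
  unfold pvGmax
  rw [← List.foldl_map]
  rcases PySem.List.foldl_max_mem (((List.range m).filter (fun i => pvKey limits i == l)).map
      (pvR limits)) 0 with h | h
  · exact Or.inl h
  · rw [List.mem_map] at h
    obtain ⟨i, hi, hval⟩ := h
    rw [List.mem_filter, List.mem_range] at hi
    exact Or.inr ⟨i, hi.1, by simpa using hi.2, hval.symm⟩

theorem pvFmax_mem (limits : List Int) (m : Nat) (l : Int) :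
    pvFmax limits m l = -1 ∨
      ∃ i, i < m ∧ pvGen limits i = true ∧ pvKey limits i = l ∧
        pvFmax limits m l = pvR limits i := by
  unfold pvFmax
  rw [← List.foldl_map]
  rcases PySem.List.foldl_max_mem (((List.range m).filter
      (fun i => pvGen limits i && (pvKey limits i == l))).map (pvR limits)) (-1) with h | h
  · exact Or.inl h
  · rw [List.mem_map] at h
    obtain ⟨i, hi, hval⟩ := h
    rw [List.mem_filter, List.mem_range] at hi
    have := hi.2
    simp only [Bool.and_eq_true, beq_iff_eq] at this
    exact Or.inr ⟨i, hi.1, this.1, this.2, hval.symm⟩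

-- when some fountain genuinely starts at l, A's dict value and B's bucket agree
theorem pvGmax_eq_pvFmax (limits : List Int) (l : Int)
    (hgen : ∃ i, i < limits.length ∧ pvGen limits i = true ∧ pvKey limits i = l) :
    pvGmax limits limits.length l = pvFmax limits limits.length l := by
  obtain ⟨i0, hi0, hg0, hk0⟩ := hgen
  have hl0 : l ≤ pvFmax limits limits.length l := by
    calc l = pvKey limits i0 := hk0.symm
    _ ≤ pvR limits i0 := pvKey_le_pvR_of_gen limits i0 hg0
    _ ≤ pvFmax limits limits.length l := pvR_le_pvFmax limits limits.length i0 hi0 hg0 hk0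
  have h0 : 0 ≤ pvFmax limits limits.length l :=
    le_trans (by have := pvKey_nonneg limits i0; omega) hl0
  apply le_antisymm
  · rcases pvGmax_mem limits limits.length l with h | ⟨j, hj, hkj, hval⟩
    · omega
    · rw [hval]
      by_cases hgj : pvGen limits j = true
      · exact pvR_le_pvFmax limits limits.length j hj hgj hkj
      · have := pvR_lt_key_of_not_gen limits j hj hgj
        omega
  · rcases pvFmax_mem limits limits.length l with h | ⟨j, hj, hgj, hkj, hval⟩
    · omega
    · rw [hval]
      exact pvR_le_pvGmax limits limits.length j hj hkj

-- when no fountain genuinely starts at l, A's dict value is below max 1 l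
theorem pvGmax_lt_of_no_gen (limits : List Int) (l : Int)
    (hno : ∀ i, i < limits.length → pvGen limits i = true → pvKey limits i ≠ l) :
    pvGmax limits limits.length l < max 1 l := by
  rcases pvGmax_mem limits limits.length l with h | ⟨j, hj, hkj, hval⟩
  · omega
  · by_cases hgj : pvGen limits j = true
    · exact absurd hkj (hno j hj hgj)
    · have := pvR_lt_key_of_not_gen limits j hj hgj
      have := pvKey_nonneg limits j
      omega

-- ===== B's prefix-max table =====

def pvPmax (limits : List Int) (p : Nat) : Int :=
  (List.range (p+1)).foldl
    (fun (acc : Int) (j : Nat) => max acc (pvFmax limits limits.length (j : Int))) (-1)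

theorem pvPmax_zero (limits : List Int) : pvPmax limits 0 = pvFmax limits limits.length 0 := by
  have := pvFmax_ge limits limits.length 0
  unfold pvPmax
  rw [show (0+1) = 1 from rfl, List.range_one]
  simp only [List.foldl_cons, List.foldl_nil, Nat.cast_zero]
  omega

theorem pvPmax_succ (limits : List Int) (p : Nat) :
    pvPmax limits (p+1) = max (pvPmax limits p) (pvFmax limits limits.length ((p:Int)+1)) := by
  unfold pvPmax
  rw [List.range_succ, List.foldl_append, List.foldl_cons, List.foldl_nil]
  norm_num

theorem pvFmax_le_pvPmax (limits : List Int) (j p : Nat) (hj : j ≤ p) :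
    pvFmax limits limits.length (j : Int) ≤ pvPmax limits p :=
  (PySem.List.le_foldl_max_int _ _ _).2 j (List.mem_range.2 (by omega))

theorem pvPmax_le (limits : List Int) (p : Nat) (M : Int) (hM : -1 ≤ M)
    (h : ∀ j : Nat, j ≤ p → pvFmax limits limits.length (j : Int) ≤ M) :
    pvPmax limits p ≤ M :=
  pvFoldMax_le _ _ _ _ hM (fun j hj => h j (by have := List.mem_range.1 hj; omega))

def pvPrefPart (limits : List Int) (k : Nat) : List Int :=
  (List.range' 1 k).foldl
    (fun P p => if P.getD p (-1) < P.getD (p-1) (-1) then P.set p (P.getD (p-1) (-1)) else P)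
    (pvBuckB limits)

theorem pvPrefB_eq_part (limits : List Int) :
    pvPrefB limits = pvPrefPart limits (limits.length - 1) := rfl

theorem pvPrefPart_length (limits : List Int) (k : Nat) :
    (pvPrefPart limits k).length = limits.length := by
  induction k with
  | zero => simpa [pvPrefPart] using pvBuckPart_length limits limits.length
  | succ k ih =>
    unfold pvPrefPart at *
    simp only [List.range'_concat, List.foldl_append, List.foldl_cons, List.foldl_nil]
    split_ifs <;> first | (rw [List.length_set]; exact ih) | exact ih

theorem pvPrefPart_getD (limits : List Int) (k : Nat) (hk : k ≤ limits.length - 1) :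
    ∀ p, p < limits.length →
    (pvPrefPart limits k).getD p (-1) =
      if p ≤ k then pvPmax limits p else pvFmax limits limits.length (p : Int) := by
  induction k with
  | zero =>
    intro p hp
    have hbase : (pvPrefPart limits 0).getD p (-1) = pvFmax limits limits.length (p : Int) := by
      simp only [pvPrefPart, List.range'_zero, List.foldl_nil, pvBuckB_eq_part]
      exact pvBuckPart_getD limits limits.length (le_refl _) p hp
    by_cases h0 : p ≤ 0
    · have : p = 0 := by omega
      subst this
      rw [if_pos (le_refl _), hbase, pvPmax_zero]
      norm_num
    · rw [if_neg h0, hbase]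
  | succ k ih =>
    have ih := ih (by omega)
    intro p hp
    have hk1 : k + 1 < limits.length := by omega
    unfold pvPrefPart at *
    rw [List.range'_concat, List.foldl_append, List.foldl_cons, List.foldl_nil]
    simp only [Nat.one_mul]
    set Q := (List.range' 1 k).foldl
      (fun P p => if P.getD p (-1) < P.getD (p-1) (-1) then P.set p (P.getD (p-1) (-1)) else P)
      (pvBuckB limits) with hQ
    have hQlen : Q.length = limits.length := pvPrefPart_length limits k
    have hQk1 : Q.getD (1+k) (-1) = pvFmax limits limits.length ((k:Int)+1) := by
      have := ih (k+1) hk1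
      rw [show (1+k) = k+1 by omega]
      rw [this, if_neg (by omega)]
      push_cast; ring_nf
    have hQk : Q.getD (1+k-1) (-1) = pvPmax limits k := by
      have := ih k (by omega)
      rw [show (1+k-1) = k by omega, this, if_pos (le_refl _)]
    rw [hQk1, hQk]
    by_cases hc : pvFmax limits limits.length ((k:Int)+1) < pvPmax limits k
    · rw [if_pos hc]
      by_cases hpk : p = k+1
      · subst hpk
        rw [if_pos (le_refl _), List.getD_eq_getElem?_getD,
          show (1+k) = k+1 by omega, List.getElem?_set_self (by omega), Option.getD_some,
          pvPmax_succ]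
        omega
      · rw [List.getD_eq_getElem?_getD, List.getElem?_set_ne (by omega),
          ← List.getD_eq_getElem?_getD, ih p hp]
        by_cases hple : p ≤ k
        · rw [if_pos hple, if_pos (by omega)]
        · rw [if_neg hple, if_neg (by omega)]
    · rw [if_neg hc]
      by_cases hpk : p = k+1
      · subst hpk
        rw [ih (k+1) hp, if_neg (by omega), if_pos (le_refl _), pvPmax_succ]
        push_cast
        omega
      · rw [ih p hp]
        by_cases hple : p ≤ k
        · rw [if_pos hple, if_pos (by omega)]
        · rw [if_neg hple, if_neg (by omega)]

theorem pvPrefB_getD (limits : List Int) (p : Nat) (hp : p < limits.length) :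
    (pvPrefB limits).getD p (-1) = pvPmax limits p := by
  rw [pvPrefB_eq_part]
  rw [pvPrefPart_getD limits (limits.length - 1) (le_refl _) p hp, if_pos (by omega)]

-- ===== the sorted items list =====

theorem pvInsertBy_congr {α : Type} (b1 b2 : α → α → Bool) (x : α) :
    ∀ (ys : List α), (∀ y ∈ ys, b1 x y = b2 x y) →
      PySem.List.insertBy b1 x ys = PySem.List.insertBy b2 x ys
  | [], _ => rfl
  | y :: t, h => by
    unfold PySem.List.insertBy
    rw [h y (by simp)]
    by_cases hb : b2 x y = true
    · simp [hb]
    · simp only [Bool.not_eq_true] at hb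
      simp [hb, pvInsertBy_congr b1 b2 x t (fun z hz => h z (by simp [hz]))]

theorem pvFoldInsertBy_congr {α : Type} (b1 b2 : α → α → Bool) (l : List α)
    (hpairs : ∀ x ∈ l, ∀ y ∈ l, b1 x y = b2 x y) :
    ∀ (xs acc : List α), (∀ x ∈ xs, x ∈ l) → (∀ y ∈ acc, y ∈ l) →
      xs.foldl (fun a x => PySem.List.insertBy b1 x a) acc =
        xs.foldl (fun a x => PySem.List.insertBy b2 x a) acc
  | [], acc, _, _ => rfl
  | x :: t, acc, hxs, hacc => by
    simp only [List.foldl_cons]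
    rw [pvInsertBy_congr b1 b2 x acc (fun y hy => hpairs x (hxs x (by simp)) y (hacc y hy))]
    exact pvFoldInsertBy_congr b1 b2 l hpairs t _ (fun z hz => hxs z (by simp [hz]))
      (fun y hy => by
        rcases List.mem_cons.1 ((PySem.List.insertBy_perm b2 x acc).mem_iff.1 hy) with h | h
        · exact h ▸ hxs x (by simp)
        · exact hacc y h)

theorem pvSorted2_eq_sorted_fst (xs : List (Int × Int)) (h : (xs.map (fun p => p.1)).Nodup) :
    PySem.List.sorted2 xs (fun p => p.1) (fun p => p.2) false =
      PySem.List.sorted xs (fun p => p.1) false := by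
  have hinj : ∀ x ∈ xs, ∀ y ∈ xs, x.1 = y.1 → x = y := by
    intro x hx y hy hxy
    exact List.inj_on_of_nodup_map h hx hy hxy
  unfold PySem.List.sorted2 PySem.List.sorted
  simp only [if_neg (by simp : ¬(false = true))]
  apply pvFoldInsertBy_congr _ _ xs _ xs [] (fun x hx => hx) (by simp)
  intro x hx y hy
  by_cases heq : x.1 = y.1
  · have := hinj x hx y hy heq
    subst this
    simp
  · rcases lt_or_gt_of_ne heq with hlt | hlt
    · simp [hlt, not_lt.2 (le_of_lt hlt)]
    · simp [hlt, not_lt.2 (le_of_lt hlt)]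

theorem pvPairwise_lt_of_le_nodup :
    ∀ (l : List (Int × Int)), l.Pairwise (fun a b => a.1 ≤ b.1) →
      (l.map (fun p => p.1)).Nodup → l.Pairwise (fun a b => a.1 < b.1)
  | [], _, _ => List.Pairwise.nil
  | x :: t, hle, hnd => by
    rw [List.pairwise_cons] at hle ⊢
    rw [List.map_cons, List.nodup_cons] at hnd
    refine ⟨fun y hy => lt_of_le_of_ne (hle.1 y hy) ?_, pvPairwise_lt_of_le_nodup t hle.2 hnd.2⟩
    intro heq
    exact hnd.1 (heq ▸ List.mem_map_of_mem hy)


theorem pvInnerA_eq : ∀ (rem : List (Int × Int)) (T c : Int),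
    activateInnerA rem T c =
      (rem.dropWhile (fun p => decide (p.1 ≤ T)),
        (rem.takeWhile (fun p => decide (p.1 ≤ T))).foldl (fun acc p => max acc p.2) c)
  | [], T, c => rfl
  | (l, r) :: rest, T, c => by
    by_cases h : l ≤ T
    · simp only [activateInnerA, if_pos h, List.dropWhile_cons, List.takeWhile_cons,
        decide_eq_true h]
      simp [pvInnerA_eq rest T (max c r)]
    · simp only [activateInnerA, if_neg h, List.dropWhile_cons, List.takeWhile_cons]
      simp [h]

-- membership in dropWhile/takeWhile of a key-sorted pair list
theorem pvMem_dropWhile : ∀ (l : List (Int × Int)) (t : Int),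
    l.Pairwise (fun a b => a.1 < b.1) →
    ∀ x, x ∈ l.dropWhile (fun p => decide (p.1 ≤ t)) ↔ x ∈ l ∧ t < x.1
  | [], t, _, x => by simp
  | y :: ys, t, hp, x => by
    rw [List.pairwise_cons] at hp
    by_cases h : y.1 ≤ t
    · rw [List.dropWhile_cons_of_pos (by simpa using h), pvMem_dropWhile ys t hp.2 x]
      constructor
      · rintro ⟨h1, h2⟩; exact ⟨by simp [h1], h2⟩
      · rintro ⟨h1, h2⟩
        rcases List.mem_cons.1 h1 with rfl | h1
        · omega
        · exact ⟨h1, h2⟩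
    · rw [List.dropWhile_cons_of_neg (by simpa using h)]
      constructor
      · intro hx
        refine ⟨hx, ?_⟩
        rcases List.mem_cons.1 hx with rfl | hx
        · omega
        · have := hp.1 x hx; omega
      · exact fun hx => hx.1
  termination_by l => l.length

theorem pvMem_takeWhile : ∀ (l : List (Int × Int)) (T : Int),
    l.Pairwise (fun a b => a.1 < b.1) →
    ∀ x, x ∈ l.takeWhile (fun p => decide (p.1 ≤ T)) ↔ x ∈ l ∧ x.1 ≤ T
  | [], T, _, x => by simp
  | y :: ys, T, hp, x => by
    rw [List.pairwise_cons] at hp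
    by_cases h : y.1 ≤ T
    · rw [List.takeWhile_cons_of_pos (by simpa using h)]
      constructor
      · intro hx
        rcases List.mem_cons.1 hx with rfl | hx
        · exact ⟨by simp, h⟩
        · have := (pvMem_takeWhile ys T hp.2 x).1 hx
          exact ⟨by simp [this.1], this.2⟩
      · rintro ⟨h1, h2⟩
        rcases List.mem_cons.1 h1 with rfl | h1
        · simp
        · exact List.mem_cons_of_mem _ ((pvMem_takeWhile ys T hp.2 x).2 ⟨h1, h2⟩)
    · rw [List.takeWhile_cons_of_neg (by simpa using h)]
      constructor
      · simp
      · rintro ⟨h1, h2⟩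
        rcases List.mem_cons.1 h1 with rfl | h1
        · omega
        · have := hp.1 x h1; omega
  termination_by l => l.length

theorem pvDropWhile_dropWhile {α : Type} (p q : α → Bool) (hpq : ∀ x, q x = true → p x = true) :
    ∀ (l : List α), (l.dropWhile q).dropWhile p = l.dropWhile p
  | [] => rfl
  | x :: xs => by
    by_cases h : q x = true
    · rw [List.dropWhile_cons_of_pos h, pvDropWhile_dropWhile p q hpq xs,
        List.dropWhile_cons_of_pos (hpq x h)]
    · rw [List.dropWhile_cons_of_neg (by simpa using h)]


-- ===== the items list A sorts =====

def pvItems (limits : List Int) : List (Int × Int) :=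
  PySem.List.sorted2
    ((pvDict limits limits.length).keys.map
      (fun l => (l, (pvDict limits limits.length).getD l 0)))
    (fun p => p.1) (fun p => p.2) false

theorem pvItems_base_nodup (limits : List Int) :
    (((pvDict limits limits.length).keys.map
      (fun l => (l, (pvDict limits limits.length).getD l 0))).map (fun p => p.1)).Nodup := by
  rw [List.map_map]
  have hcomp : ((fun p : Int × Int => p.1) ∘ fun l => (l, (pvDict limits limits.length).getD l 0))
      = fun l => l := rfl
  rw [hcomp, List.map_id']
  exact pvDict_nodup limits limits.length

theorem pvItems_eq_sorted (limits : List Int) :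
    pvItems limits = PySem.List.sorted
      ((pvDict limits limits.length).keys.map
        (fun l => (l, (pvDict limits limits.length).getD l 0)))
      (fun p => p.1) false :=
  pvSorted2_eq_sorted_fst _ (pvItems_base_nodup limits)

theorem pvItems_pairwise (limits : List Int) :
    (pvItems limits).Pairwise (fun a b => a.1 < b.1) := by
  rw [pvItems_eq_sorted]
  apply pvPairwise_lt_of_le_nodup _ (PySem.List.sorted_pairwise _ _)
  have hperm := (PySem.List.sorted_perm
    ((pvDict limits limits.length).keys.map
      (fun l => (l, (pvDict limits limits.length).getD l 0)))
    (fun p => p.1) false).map (fun p => p.1)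
  exact hperm.nodup_iff.2 (pvItems_base_nodup limits)

theorem pvItems_mem (limits : List Int) (x : Int × Int) :
    x ∈ pvItems limits ↔
      (∃ i, i < limits.length ∧ pvKey limits i = x.1) ∧
        x.2 = pvGmax limits limits.length x.1 := by
  have hperm := PySem.List.sorted2_perm
    ((pvDict limits limits.length).keys.map
      (fun l => (l, (pvDict limits limits.length).getD l 0)))
    (fun p => p.1) (fun p => p.2) false
  rw [pvItems, hperm.mem_iff, List.mem_map]
  constructor
  · rintro ⟨l, hl, rfl⟩
    exact ⟨(pvDict_keys limits limits.length l).1 hl,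
      by simp [pvDict_getD limits limits.length l]⟩
  · rintro ⟨hex, hval⟩
    refine ⟨x.1, (pvDict_keys limits limits.length x.1).2 hex, ?_⟩
    rw [pvDict_getD limits limits.length x.1, ← hval]

-- ===== the coupled round =====

theorem pvRound (limits : List Int) (t endv : Int)
    (hn : 2 ≤ limits.length)
    (hCov : ∀ x, x < limits.length → 1 ≤ x →
      ∃ i, i < limits.length ∧ (i : Int) - limits.getD i 0 ≤ (x : Int) ∧
        (x : Int) ≤ (i : Int) + limits.getD i 0)
    (ht1 : -1 ≤ t) (ht2 : t ≤ endv) (hend0 : 0 ≤ endv)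
    (hendL : endv ≤ (limits.length : Int) - 2)
    (hInv : ∀ l : Int, l ≤ t → pvGmax limits limits.length l ≤ endv) :
    ∃ M,
      activateInnerA ((pvItems limits).dropWhile (fun p => decide (p.1 ≤ t))) (endv + 1) 0 =
        ((pvItems limits).dropWhile (fun p => decide (p.1 ≤ endv + 1)), M) ∧
      pvPmax limits (endv + 1).toNat = M ∧
      endv + 1 ≤ M ∧ M ≤ (limits.length : Int) - 1 ∧
      (∀ l : Int, l ≤ endv + 1 → pvGmax limits limits.length l ≤ M) := by
  set T := endv + 1 with hT_def
  have hT1 : 1 ≤ T := by omega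
  have hTL : T ≤ (limits.length : Int) - 1 := by omega
  have hTcast : ((T.toNat : Nat) : Int) = T := by omega
  have hpair := pvItems_pairwise limits
  have hpair' : ((pvItems limits).dropWhile (fun p => decide (p.1 ≤ t))).Pairwise
      (fun a b => a.1 < b.1) := hpair.sublist (List.dropWhile_sublist _)
  -- A's inner loop in closed form
  have hA := pvInnerA_eq ((pvItems limits).dropWhile (fun p => decide (p.1 ≤ t))) T 0
  rw [pvDropWhile_dropWhile _ _ (by intro x hx; simp at hx ⊢; omega)] at hA
  set S := ((pvItems limits).dropWhile (fun p => decide (p.1 ≤ t))).takeWhile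
      (fun p => decide (p.1 ≤ T)) with hS_def
  set MA := S.foldl (fun acc p => max acc p.2) 0 with hMA_def
  -- membership of the consumed segment
  have hmemS : ∀ x, x ∈ S ↔ x ∈ pvItems limits ∧ t < x.1 ∧ x.1 ≤ T := by
    intro x
    rw [hS_def, pvMem_takeWhile _ _ hpair', pvMem_dropWhile _ _ hpair]
    tauto
  have hMA0 : 0 ≤ MA := (PySem.List.le_foldl_max_int S _ 0).1
  -- coverage at position T gives a genuine fountain with t < key ≤ T and reach ≥ T
  obtain ⟨i0, hi0, hcov1, hcov2⟩ := hCov T.toNat (by omega) (by omega)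
  rw [hTcast] at hcov1 hcov2
  have hg0 : pvGen limits i0 = true := by
    simp only [pvGen, pvKey, pvA, decide_eq_true_eq]
    omega
  have hkey0le : pvKey limits i0 ≤ T := by
    simp only [pvKey, pvA]; omega
  have hr0 : T ≤ pvR limits i0 := by
    simp only [pvR, pvA]; omega
  have hkey0gt : t < pvKey limits i0 := by
    by_contra hle
    have h1 := pvR_le_pvGmax limits limits.length i0 hi0 rfl
    have h2 := hInv (pvKey limits i0) (by omega)
    omega
  -- T ≤ MA: the coverage fountain's item is consumed this round
  have hTMA : T ≤ MA := by
    have hmem : ((pvKey limits i0), pvGmax limits limits.length (pvKey limits i0)) ∈ S := by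
      rw [hmemS]
      exact ⟨(pvItems_mem limits _).2 ⟨⟨i0, hi0, rfl⟩, rfl⟩, hkey0gt, hkey0le⟩
    have hv := (PySem.List.le_foldl_max_int S (fun p => p.2) 0).2 _ hmem
    have hr := pvR_le_pvGmax limits limits.length i0 hi0 rfl
    simp only at hv
    omega
  -- T ≤ pvPmax T.toNat: via the same fountain through the bucket table
  have hkey0cast : (((pvKey limits i0).toNat : Nat) : Int) = pvKey limits i0 :=
    (pvKey_toNat limits i0 hg0).1
  have hTP : T ≤ pvPmax limits T.toNat := by
    calc T ≤ pvR limits i0 := hr0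
      _ ≤ pvFmax limits limits.length (pvKey limits i0) :=
          pvR_le_pvFmax limits limits.length i0 hi0 hg0 rfl
      _ = pvFmax limits limits.length (((pvKey limits i0).toNat : Nat) : Int) := by
          rw [hkey0cast]
      _ ≤ pvPmax limits T.toNat := pvFmax_le_pvPmax limits (pvKey limits i0).toNat T.toNat
          (by have := pvKey_nonneg limits i0; omega)
  -- pvPmax T.toNat ≤ MA
  have hPMA : pvPmax limits T.toNat ≤ MA := by
    apply pvPmax_le limits T.toNat MA (by omega)
    intro j hj
    rcases pvFmax_mem limits limits.length (j : Int) with hcase | ⟨i, hi, hgi, hki, hval⟩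
    · omega
    · have hgval : pvGmax limits limits.length (j : Int) = pvFmax limits limits.length (j : Int) :=
        pvGmax_eq_pvFmax limits _ ⟨i, hi, hgi, hki⟩
      by_cases hjt : (j : Int) ≤ t
      · have := hInv (j : Int) hjt
        omega
      · have hmem : ((j : Int), pvGmax limits limits.length (j : Int)) ∈ S := by
          rw [hmemS]
          exact ⟨(pvItems_mem limits _).2 ⟨⟨i, hi, hki⟩, rfl⟩, by omega, by omega⟩
        have := (PySem.List.le_foldl_max_int S (fun p => p.2) 0).2 _ hmem
        simp only at this
        omega
  -- MA ≤ pvPmax T.toNat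
  have hMAP : MA ≤ pvPmax limits T.toNat := by
    apply pvFoldMax_le _ _ _ _ (by omega)
    intro x hx
    rw [hmemS] at hx
    obtain ⟨hxitems, hxt, hxT⟩ := hx
    obtain ⟨⟨i, hi, hki⟩, hval⟩ := (pvItems_mem limits x).1 hxitems
    have hx1 : 0 ≤ x.1 := by rw [← hki]; exact pvKey_nonneg limits i
    by_cases hgenex : ∃ i', i' < limits.length ∧ pvGen limits i' = true ∧ pvKey limits i' = x.1
    · have hgf : pvGmax limits limits.length x.1 = pvFmax limits limits.length x.1 :=
        pvGmax_eq_pvFmax limits _ hgenex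
      rw [hval, hgf]
      calc pvFmax limits limits.length x.1
          = pvFmax limits limits.length ((x.1.toNat : Nat) : Int) := by
            rw [show ((x.1.toNat : Nat) : Int) = x.1 by omega]
        _ ≤ pvPmax limits T.toNat := pvFmax_le_pvPmax limits x.1.toNat T.toNat (by omega)
    · push_neg at hgenex
      have := pvGmax_lt_of_no_gen limits x.1 (fun i' hi' hg' => hgenex i' hi' hg')
      rw [hval]
      omega
  have hPeq : pvPmax limits T.toNat = MA := le_antisymm hPMA hMAP
  -- MA ≤ L - 1
  have hMAle : MA ≤ (limits.length : Int) - 1 := by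
    apply pvFoldMax_le _ _ _ _ (by omega)
    intro x hx
    rw [hmemS] at hx
    obtain ⟨⟨i, hi, hki⟩, hval⟩ := (pvItems_mem limits x).1 hx.1
    rw [hval]
    exact pvGmax_le limits limits.length x.1 (by omega)
  refine ⟨MA, by rw [hA], hPeq, by omega, hMAle, ?_⟩
  -- the new invariant
  intro l hl
  by_cases hlt : l ≤ t
  · have := hInv l hlt; omega
  · by_cases hgenex : ∃ i', i' < limits.length ∧ pvGen limits i' = true ∧ pvKey limits i' = l
    · have hfm : pvGmax limits limits.length l = pvFmax limits limits.length l :=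
        pvGmax_eq_pvFmax limits _ hgenex
      obtain ⟨i', hi', hg', hk'⟩ := hgenex
      have hl0 : 0 ≤ l := by rw [← hk']; exact pvKey_nonneg limits i'
      rw [hfm, ← hPeq]
      calc pvFmax limits limits.length l
          = pvFmax limits limits.length ((l.toNat : Nat) : Int) := by
            rw [show ((l.toNat : Nat) : Int) = l by omega]
        _ ≤ pvPmax limits T.toNat := pvFmax_le_pvPmax limits l.toNat T.toNat (by omega)
    · push_neg at hgenex
      have := pvGmax_lt_of_no_gen limits l (fun i' hi' hg' => hgenex i' hi' hg')
      omega

-- ===== gmax at negative keys, dropWhile at -1 =====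

theorem pvGmax_neg (limits : List Int) (m : Nat) (l : Int) (hl : l < 0) :
    pvGmax limits m l = 0 := by
  unfold pvGmax
  rw [List.filter_eq_nil_iff.2 (fun i _ => by
    simp only [beq_iff_eq]
    have := pvKey_nonneg limits i
    omega)]
  rfl

theorem pvDropWhile_neg_one (limits : List Int) :
    (pvItems limits).dropWhile (fun p => decide (p.1 ≤ (-1 : Int))) = pvItems limits := by
  cases h : pvItems limits with
  | nil => rfl
  | cons hd tl =>
    have hmem : hd ∈ pvItems limits := by rw [h]; simp
    obtain ⟨⟨i, hi, hki⟩, _⟩ := (pvItems_mem limits hd).1 hmem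
    have := pvKey_nonneg limits i
    rw [List.dropWhile_cons_of_neg (by simp; omega)]

-- ===== the coupled main loop =====

theorem pvLoop (limits : List Int)
    (hn : 2 ≤ limits.length)
    (hCov : ∀ x, x < limits.length → 1 ≤ x →
      ∃ i, i < limits.length ∧ (i : Int) - limits.getD i 0 ≤ (x : Int) ∧
        (x : Int) ≤ (i : Int) + limits.getD i 0) :
    ∀ (fuel : Nat) (t endv ans : Int),
      -1 ≤ t → t ≤ endv → 0 ≤ endv → endv ≤ (limits.length : Int) - 1 →
      (∀ l : Int, l ≤ t → pvGmax limits limits.length l ≤ endv) →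
      activateLoopA ((pvItems limits).dropWhile (fun p => decide (p.1 ≤ t)))
          (limits.length : Int) fuel endv ans
        = activateLoopB (pvPrefB limits) (limits.length : Int) fuel endv ans
  | 0, t, endv, ans, _, _, _, _, _ => rfl
  | fuel+1, t, endv, ans, ht1, ht2, hend0, hendL, hInv => by
    by_cases hlt : endv < (limits.length : Int) - 1
    · obtain ⟨M, hA, hP, hM1, hM2, hInv'⟩ :=
        pvRound limits t endv hn hCov ht1 ht2 hend0 (by omega) hInv
      rw [activateLoopA, activateLoopB, if_pos hlt, if_pos hlt]
      simp only [hA]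
      have hB : (pvPrefB limits).getD (endv + 1).toNat (-1) = M := by
        rw [pvPrefB_getD limits (endv + 1).toNat (by omega), hP]
      rw [hB]
      exact pvLoop limits hn hCov fuel (endv + 1) M (ans + 1) (by omega) hM1 (by omega) hM2 hInv'
    · rw [activateLoopA, activateLoopB, if_neg hlt, if_neg hlt]

-- ===== the initial end value =====

theorem pvItems_ne_nil (limits : List Int) (hn : 1 ≤ limits.length) :
    pvItems limits ≠ [] := by
  intro h
  have : ((0:Nat) < limits.length) := by omega
  have hmem : ((pvKey limits 0), pvGmax limits limits.length (pvKey limits 0)) ∈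
      pvItems limits :=
    (pvItems_mem limits _).2 ⟨⟨0, by omega, rfl⟩, rfl⟩
  rw [h] at hmem
  simp at hmem

theorem pvHead_snd_nonneg (limits : List Int) :
    0 ≤ (PySem.List.pyGetD (pvItems limits) 0 ((0:Int), (0:Int))).2 := by
  cases h : pvItems limits with
  | nil => simp [PySem.List.pyGetD_zero]
  | cons hd tl =>
    have hmem : hd ∈ pvItems limits := by rw [h]; simp
    obtain ⟨_, hval⟩ := (pvItems_mem limits hd).1 hmem
    rw [PySem.List.pyGetD_zero_cons, hval]
    exact pvGmax_nonneg limits limits.length hd.1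

theorem pvEnd0 (limits : List Int) (hn : 2 ≤ limits.length)
    (hCov : ∀ x, x < limits.length → 1 ≤ x →
      ∃ i, i < limits.length ∧ (i : Int) - limits.getD i 0 ≤ (x : Int) ∧
        (x : Int) ≤ (i : Int) + limits.getD i 0) :
    (PySem.List.pyGetD (pvItems limits) 0 ((0:Int), (0:Int))).2 =
      (if 0 ≤ pvFmax limits limits.length 0
        then pvFmax limits limits.length 0
        else pvFmax limits limits.length 1) ∧
    (PySem.List.pyGetD (pvItems limits) 0 ((0:Int), (0:Int))).2 ≤ (limits.length : Int) - 1 := by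
  obtain ⟨hd, tl, hcons⟩ := List.exists_cons_of_ne_nil (pvItems_ne_nil limits (by omega))
  have hdmem : hd ∈ pvItems limits := by rw [hcons]; simp
  obtain ⟨⟨ih, hih, hkih⟩, hdval⟩ := (pvItems_mem limits hd).1 hdmem
  have hd1 : 0 ≤ hd.1 := by rw [← hkih]; exact pvKey_nonneg limits ih
  have hpair := pvItems_pairwise limits
  rw [hcons, List.pairwise_cons] at hpair
  have hget : PySem.List.pyGetD (pvItems limits) 0 ((0:Int), (0:Int)) = hd := by
    rw [hcons, PySem.List.pyGetD_zero_cons]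
  by_cases h0 : 0 ≤ pvFmax limits limits.length 0
  · rw [if_pos h0]
    rcases pvFmax_mem limits limits.length 0 with hc | ⟨i, hi, hgi, hki, hval⟩
    · omega
    · have hgf : pvGmax limits limits.length 0 = pvFmax limits limits.length 0 :=
        pvGmax_eq_pvFmax limits 0 ⟨i, hi, hgi, hki⟩
      have hmem0 : ((0:Int), pvGmax limits limits.length 0) ∈ pvItems limits :=
        (pvItems_mem limits _).2 ⟨⟨i, hi, hki⟩, rfl⟩
      rw [hcons] at hmem0
      rcases List.mem_cons.1 hmem0 with heq | hmem0
      · rw [hget, ← heq]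
        refine ⟨hgf, ?_⟩
        have := pvGmax_le limits limits.length 0 (by omega)
        omega
      · have := hpair.1 _ hmem0
        omega
  · rw [if_neg h0]
    have hfm0 : pvFmax limits limits.length 0 = -1 := by
      have := pvFmax_ge limits limits.length 0
      omega
    -- no fountain at all has key 0
    have hnokey0 : ∀ i, i < limits.length → pvKey limits i ≠ 0 := by
      intro i hi hk
      have hgi : pvGen limits i = true := by
        simp only [pvGen, pvKey, pvA, decide_eq_true_eq]
        simp only [pvKey, pvA] at hk
        omega
      have h1 := pvR_le_pvFmax limits limits.length i hi hgi hk
      have h2 := pvKey_le_pvR_of_gen limits i hgi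
      rw [hk] at h2
      rw [hfm0] at h1
      omega
    -- coverage of position 1 gives a genuine fountain with key 1
    obtain ⟨i1, hi1, hc1, hc2⟩ := hCov 1 (by omega) (by omega)
    simp only [Nat.cast_one] at hc1 hc2
    have hg1 : pvGen limits i1 = true := by
      simp only [pvGen, pvKey, pvA, decide_eq_true_eq]
      omega
    have hk1 : pvKey limits i1 = 1 := by
      have hle : pvKey limits i1 ≤ 1 := by simp only [pvKey, pvA]; omega
      have := pvKey_nonneg limits i1
      have := hnokey0 i1 hi1
      omega
    have hgf1 : pvGmax limits limits.length 1 = pvFmax limits limits.length 1 :=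
      pvGmax_eq_pvFmax limits 1 ⟨i1, hi1, hg1, hk1⟩
    have hmem1 : ((1:Int), pvGmax limits limits.length 1) ∈ pvItems limits :=
      (pvItems_mem limits _).2 ⟨⟨i1, hi1, hk1⟩, rfl⟩
    rw [hcons] at hmem1
    have hd1' : hd.1 ≠ 0 := by rw [← hkih]; exact hnokey0 ih hih
    rcases List.mem_cons.1 hmem1 with heq | hmem1
    · rw [hget, ← heq]
      refine ⟨hgf1, ?_⟩
      have := pvGmax_le limits limits.length 1 (by omega)
      omega
    · have := hpair.1 _ hmem1
      omega


theorem activate_eq_helper (limits : List Int) :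
    activate limits = activateLoopA (pvItems limits) (limits.length : Int)
      (limits.length + 1) ((PySem.List.pyGetD (pvItems limits) 0 ((0:Int), (0:Int))).2) 1 := rfl

theorem activate_alt_eq_helper (limits : List Int) :
    activate_alt limits =
      if limits.length = 1 then 1
      else activateLoopB (pvPrefB limits) (limits.length : Int)
        (limits.length + 1)
        (if 0 ≤ (pvPrefB limits).getD 0 (-1)
          then (pvPrefB limits).getD 0 (-1)
          else (pvPrefB limits).getD 1 (-1)) 1 := rfl

theorem activate_one (limits : List Int) (h : limits.length = 1) : activate limits = 1 := by
  have he0 := pvHead_snd_nonneg limits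
  rw [activate_eq_helper, h]
  rw [show (1:Nat) + 1 = 2 from rfl]
  rw [activateLoopA]
  rw [if_neg (by push_cast; omega)]

theorem pvPrefB_end0 (limits : List Int) (hn : 2 ≤ limits.length) :
    (if 0 ≤ (pvPrefB limits).getD 0 (-1)
      then (pvPrefB limits).getD 0 (-1)
      else (pvPrefB limits).getD 1 (-1)) =
    (if 0 ≤ pvFmax limits limits.length 0
      then pvFmax limits limits.length 0
      else pvFmax limits limits.length 1) := by
  have h0 : (pvPrefB limits).getD 0 (-1) = pvPmax limits 0 :=
    pvPrefB_getD limits 0 (by omega)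
  have h1 : (pvPrefB limits).getD 1 (-1) = pvPmax limits 1 :=
    pvPrefB_getD limits 1 (by omega)
  rw [h0, h1, pvPmax_zero]
  by_cases hc : 0 ≤ pvFmax limits limits.length 0
  · rw [if_pos hc, if_pos hc]
  · rw [if_neg hc, if_neg hc]
    have hfm0 : pvFmax limits limits.length 0 = -1 := by
      have := pvFmax_ge limits limits.length 0
      omega
    have hfm1 := pvFmax_ge limits limits.length 1
    rw [show (1:Nat) = 0 + 1 from rfl, pvPmax_succ, pvPmax_zero, hfm0]
    push_cast
    omega

theorem activate_eq_two (limits : List Int) (hn : 2 ≤ limits.length)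
    (hCov : ∀ x, x < limits.length → 1 ≤ x →
      ∃ i, i < limits.length ∧ (i : Int) - limits.getD i 0 ≤ (x : Int) ∧
        (x : Int) ≤ (i : Int) + limits.getD i 0) :
    activate limits = activate_alt limits := by
  obtain ⟨he0eq, he0le⟩ := pvEnd0 limits hn hCov
  have he00 := pvHead_snd_nonneg limits
  have hloop := pvLoop limits hn hCov (limits.length + 1) (-1)
    ((PySem.List.pyGetD (pvItems limits) 0 ((0:Int), (0:Int))).2) 1
    (by omega) (by omega) he00 he0le
    (fun l hl => by rw [pvGmax_neg limits limits.length l (by omega)]; omega)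
  rw [pvDropWhile_neg_one limits] at hloop
  rw [activate_eq_helper, hloop, activate_alt_eq_helper, if_neg (by omega),
    pvPrefB_end0 limits hn, ← he0eq]

theorem activate_final (limits : List Int) (hpre : Pre_activate limits) :
    activate limits = activate_alt limits := by
  obtain ⟨hne, hcov⟩ := hpre
  have hn1 : limits.length ≠ 0 := fun h => hne (List.length_eq_zero_iff.1 h)
  by_cases h1 : limits.length = 1
  · rw [activate_one limits h1, activate_alt_eq_helper, if_pos h1]
  · exact activate_eq_two limits (by omega) hcov

-- ===== VERDICT (by name: the statement is the Claim_ definition above) =====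
theorem activate_spec : Claim_equal_activate :=
  fun limits _ hpre => activate_final limits hpre
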